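-- pv_equiv track=rewrite | github.com/bernik86/sum-of-minterms | sum_of_min_terms.py | normalize_bool_fct_str
-- ===== SOURCE A (Python) =====
-- def normalize_bool_fct_str(fct_str: str) -> str:
--     '''
--         Clean the raw form of the boolean expression given by the user.
--         Removes spaces, escape characters, etc. and inserts AND operator
--         where needed.
--
--         fct_str: string containing the raw form of the boolean expression.
--
--         Returns cleaned up string of boolean expression.
--     '''
--
--     fct_str = (
--         fct_str.upper()
--         .replace(" ", "")
--         .replace("\\", "")
--         .replace("!", "'")
--         .strip("*")
--         .strip("+")
--     )
--     pos = []
--     for i in range(len(fct_str) - 1):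
--         sym_i = fct_str[i]
--         sym_i1 = fct_str[i + 1]
--
--         if (sym_i.isalpha() or sym_i == "'") and (sym_i1.isalpha() or sym_i1 == "("):
--             pos.append(i)
--         elif sym_i == ")" and sym_i1.isalpha():
--             pos.append(i)
--
--     for i in reversed(pos):
--         fct_str = fct_str[: i + 1] + "*" + fct_str[i + 1 :]
--
--     return fct_str
-- ===== SOURCE B (Python) =====
-- def _needs_and(a: str, b: str) -> bool:
--     if (a.isalpha() or a == "'") and (b.isalpha() or b == "("):
--         return True
--     if a == ")" and b.isalpha():
--         return True
--     return False
--
--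
-- def normalize_bool_fct_str(fct_str: str) -> str:
--     fct_str = (
--         fct_str.upper()
--         .replace(" ", "")
--         .replace("\\", "")
--         .replace("!", "'")
--         .strip("*")
--         .strip("+")
--     )
--     out = []
--     for cur, nxt in zip(fct_str, fct_str[1:]):
--         out.append(cur)
--         if _needs_and(cur, nxt):
--             out.append("*")
--     out.extend(fct_str[-1:])
--     return "".join(out)
-- ===== Notes on version B (the rewrite author's own statement) =====
-- stated objective: faster
-- what changed: Replaces A's two passes (collect an index list, then splice '*' into the string by repeated reversed slicing, rebuilding the whole string per insertion) with a single forward pass over adjacent character pairs that streams the output list and joins it once.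
import Mathlib
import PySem

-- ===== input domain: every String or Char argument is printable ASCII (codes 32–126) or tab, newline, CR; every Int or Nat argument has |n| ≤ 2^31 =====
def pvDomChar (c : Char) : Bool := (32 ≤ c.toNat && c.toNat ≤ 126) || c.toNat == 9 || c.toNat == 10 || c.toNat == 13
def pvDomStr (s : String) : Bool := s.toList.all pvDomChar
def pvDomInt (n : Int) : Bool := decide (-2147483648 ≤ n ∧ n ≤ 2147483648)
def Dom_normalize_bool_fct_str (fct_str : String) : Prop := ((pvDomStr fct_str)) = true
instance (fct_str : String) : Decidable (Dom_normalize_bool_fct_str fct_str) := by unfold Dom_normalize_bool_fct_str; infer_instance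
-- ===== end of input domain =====

-- B streams the output in one forward pass over adjacent pairs instead of A's
-- index-list + reversed-splice scheme (which rebuilds the string per insertion); measured faster in a timing run.

-- ===== PORT A =====
-- the cleaning chain shared verbatim by A and B: upper, remove ' ' and '\', '!' -> '\'', strip '*', strip '+'
def pvClean (fct_str : String) : List Char :=
  PySem.Chars.stripChars
    (PySem.Chars.stripChars
      (PySem.Chars.replace
        (PySem.Chars.replace
          (PySem.Chars.replace (PySem.Chars.upper fct_str.toList) [' '] [])
          ['\\'] [])
        ['!'] ['\''])
      ['*'])
    ['+']

def normalize_bool_fct_str (fct_str : String) : String :=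
  let s := pvClean fct_str
  let pos : List Nat :=
    (List.range (s.length - 1)).foldl
      (fun acc i =>
        let sym_i := s.getD i ' '
        let sym_i1 := s.getD (i + 1) ' '
        if (PySem.Chars.isalpha sym_i || sym_i == '\'') &&
             (PySem.Chars.isalpha sym_i1 || sym_i1 == '(') then acc ++ [i]
        else if sym_i == ')' && PySem.Chars.isalpha sym_i1 then acc ++ [i]
        else acc) []
  let res := pos.reverse.foldl
    (fun t i =>
      PySem.List.slice t none (some (Int.ofNat i + 1)) ++
        '*' :: PySem.List.slice t (some (Int.ofNat i + 1)) none) s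
  String.ofList res

-- ===== PORT B =====
def pvNeedsAnd (a b : Char) : Bool :=
  if (PySem.Chars.isalpha a || a == '\'') && (PySem.Chars.isalpha b || b == '(') then true
  else if a == ')' && PySem.Chars.isalpha b then true
  else false

-- one forward pass over adjacent pairs (B's zip loop), the last char kept as is
def pvStream : List Char → List Char
  | [] => []
  | [c] => [c]
  | c :: d :: rest =>
      if pvNeedsAnd c d then c :: '*' :: pvStream (d :: rest)
      else c :: pvStream (d :: rest)

def normalize_bool_fct_str_alt (fct_str : String) : String :=
  String.ofList (pvStream (pvClean fct_str))

-- ===== PRECONDITION & SPEC =====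
def Spec_normalize_bool_fct_str (fct_str : String) (out : String) : Prop := out = normalize_bool_fct_str_alt fct_str
instance (fct_str : String) (out : String) : Decidable (Spec_normalize_bool_fct_str fct_str out) := by unfold Spec_normalize_bool_fct_str; infer_instance

-- ===== CLAIM (what is proved, stated in full; the proofs are below) =====
def Claim_equal_normalize_bool_fct_str : Prop := ∀ (fct_str : String), Dom_normalize_bool_fct_str fct_str → Spec_normalize_bool_fct_str fct_str (normalize_bool_fct_str fct_str)

-- ===== LEMMAS AND PROOFS =====

-- streaming insertion of '*' after every index (of the original string) in ps,
-- walking the suffix l whose head has index k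
def pvIns (l : List Char) (ps : List Nat) (k : Nat) : List Char :=
  match l with
  | [] => []
  | c :: cs => if k ∈ ps then c :: '*' :: pvIns cs ps (k + 1) else c :: pvIns cs ps (k + 1)

theorem pvIns_nil (l : List Char) (k : Nat) : pvIns l [] k = l := by
  induction l generalizing k with
  | nil => rfl
  | cons c cs ih => simp [pvIns, ih]

theorem pvIns_cons_irrel (cs : List Char) (i : Nat) (rest : List Nat) :
    ∀ k, i < k → pvIns cs (i :: rest) k = pvIns cs rest k := by
  induction cs with
  | nil => intro k _; rfl
  | cons c cs ih =>
      intro k hk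
      have hne : ¬ (k = i) := by omega
      simp [pvIns, hne, ih (k + 1) (by omega)]

theorem pvIns_splice (rest : List Nat) (i : Nat) :
    ∀ (l : List Char) (k : Nat), (∀ j ∈ rest, i < j) → k ≤ i → i + 1 ≤ k + l.length →
    (pvIns l rest k).take (i + 1 - k) ++ '*' :: (pvIns l rest k).drop (i + 1 - k)
      = pvIns l (i :: rest) k := by
  intro l
  induction l with
  | nil => intro k _ _ hlen; simp at hlen; omega
  | cons c cs ih =>
      intro k hall hki hlen
      have hknr : k ∉ rest := fun h => by have := hall k h; omega
      by_cases hk : k = i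
      · subst hk
        simp only [pvIns, if_neg hknr, if_pos (List.mem_cons_self ..)]
        have h1 : k + 1 - k = 1 := by omega
        simp [h1, pvIns_cons_irrel cs k rest (k + 1) (by omega)]
      · have hki' : k + 1 ≤ i := by omega
        have hkni : k ∉ (i :: rest) := by
          simp [hknr]; omega
        simp only [pvIns, if_neg hknr, if_neg hkni]
        have h2 : i + 1 - k = (i + 1 - (k + 1)) + 1 := by omega
        rw [h2]
        simp only [List.take_succ_cons, List.drop_succ_cons]
        rw [List.cons_append]
        rw [ih (k + 1) hall hki' (by simp at hlen ⊢; omega)]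

theorem pvFoldr_splice (ps : List Nat) (l : List Char)
    (hp : ps.Pairwise (· < ·)) (hb : ∀ i ∈ ps, i < l.length) :
    ps.foldr (fun i t => t.take (i + 1) ++ '*' :: t.drop (i + 1)) l = pvIns l ps 0 := by
  induction ps with
  | nil => simp [pvIns_nil]
  | cons i rest ih =>
      have hp' := (List.pairwise_cons.mp hp)
      have hrec := ih hp'.2 (fun j hj => hb j (List.mem_cons_of_mem _ hj))
      simp only [List.foldr_cons, hrec]
      have := pvIns_splice rest i l 0 hp'.1 (Nat.zero_le _)
        (by have := hb i (List.mem_cons_self ..); omega)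
      simpa using this

-- the pair condition, as A classifies the characters
def pvCondA (a b : Char) : Bool :=
  if (PySem.Chars.isalpha a || a == '\'') && (PySem.Chars.isalpha b || b == '(') then true
  else if a == ')' && PySem.Chars.isalpha b then true
  else false

theorem pvPos_eq_filter (s : List Char) :
    (List.range (s.length - 1)).foldl
      (fun acc i =>
        let sym_i := s.getD i ' '
        let sym_i1 := s.getD (i + 1) ' '
        if (PySem.Chars.isalpha sym_i || sym_i == '\'') &&
             (PySem.Chars.isalpha sym_i1 || sym_i1 == '(') then acc ++ [i]
        else if sym_i == ')' && PySem.Chars.isalpha sym_i1 then acc ++ [i]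
        else acc) []
    = (List.range (s.length - 1)).filter (fun i => pvCondA (s.getD i ' ') (s.getD (i + 1) ' ')) := by
  have h : ∀ (L : List Nat) (acc : List Nat),
      L.foldl
        (fun acc i =>
          let sym_i := s.getD i ' '
          let sym_i1 := s.getD (i + 1) ' '
          if (PySem.Chars.isalpha sym_i || sym_i == '\'') &&
               (PySem.Chars.isalpha sym_i1 || sym_i1 == '(') then acc ++ [i]
          else if sym_i == ')' && PySem.Chars.isalpha sym_i1 then acc ++ [i]
          else acc) acc
      = acc ++ L.filter (fun i => pvCondA (s.getD i ' ') (s.getD (i + 1) ' ')) := by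
    intro L
    induction L with
    | nil => simp
    | cons x L ih =>
        intro acc
        simp only [List.foldl_cons, List.filter_cons]
        rw [ih]
        simp only [pvCondA]
        split_ifs <;> simp_all
  simpa using h (List.range (s.length - 1)) []

theorem pvStream_eq_ins (s : List Char) :
    ∀ (l : List Char) (k : Nat), l = s.drop k →
    pvIns l ((List.range (s.length - 1)).filter
      (fun i => pvCondA (s.getD i ' ') (s.getD (i + 1) ' '))) k = pvStream l := by
  intro l
  induction l with
  | nil => intro k _; rfl
  | cons c cs ih =>
      intro k hk
      match hcs : cs, hk with
      | [], hk =>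
          have hlen : s.length = k + 1 := by
            have := congrArg List.length hk
            simp [List.length_drop] at this
            omega
          have hnm : k ∉ (List.range (s.length - 1)).filter
              (fun i => pvCondA (s.getD i ' ') (s.getD (i + 1) ' ')) := by
            intro hmem
            have := (List.mem_filter.mp hmem).1
            rw [List.mem_range] at this
            omega
          simp only [pvIns, if_neg hnm]
          rfl
      | d :: rest, hk =>
          have hlen : k + 2 ≤ s.length := by
            have := congrArg List.length hk
            simp [List.length_drop] at this
            omega
          have hgk : s.getD k ' ' = c := by
            have h0 : s[k + 0]? = some c := by
              rw [← List.getElem?_drop, ← hk]; rfl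
            have h0' : s[k]? = some c := by simpa using h0
            simp [List.getD_eq_getElem?_getD, h0']
          have hdk1 : s.drop (k + 1) = d :: rest := by
            have ht : (s.drop k).tail = s.drop (k + 1) := by
              rw [List.tail_drop]
            rw [← ht, ← hk]; rfl
          have hgk1 : s.getD (k + 1) ' ' = d := by
            have h0 : s[k + 1 + 0]? = some d := by
              rw [← List.getElem?_drop, hdk1]; rfl
            have h0' : s[k + 1]? = some d := by simpa using h0
            simp [List.getD_eq_getElem?_getD, h0']
          have hmem : k ∈ (List.range (s.length - 1)).filter
                (fun i => pvCondA (s.getD i ' ') (s.getD (i + 1) ' '))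
              ↔ pvCondA c d = true := by
            rw [List.mem_filter, List.mem_range]
            constructor
            · intro h; rw [← hgk, ← hgk1]; exact h.2
            · intro h; exact ⟨by omega, by rw [hgk, hgk1]; exact h⟩
          have ihr := ih (k + 1) hdk1.symm
          by_cases hc : pvCondA c d = true
          · have hs : pvStream (c :: d :: rest) = c :: '*' :: pvStream (d :: rest) := by
              simp [pvStream, show pvNeedsAnd c d = true from hc]
            rw [hs, ← ihr]
            simp only [pvIns, if_pos (hmem.mpr hc)]
          · have hcf : pvNeedsAnd c d = false := by
              cases h : pvCondA c d
              · exact h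
              · exact absurd h hc
            have hs : pvStream (c :: d :: rest) = c :: pvStream (d :: rest) := by
              simp [pvStream, hcf]
            have hnm2 : k ∉ (List.range (s.length - 1)).filter
                (fun i => pvCondA (s.getD i ' ') (s.getD (i + 1) ' ')) := fun h => hc (hmem.mp h)
            rw [hs, ← ihr]
            simp only [pvIns, if_neg hnm2]

theorem pvMain (s : List Char) :
    (((List.range (s.length - 1)).foldl
      (fun acc i =>
        let sym_i := s.getD i ' '
        let sym_i1 := s.getD (i + 1) ' '
        if (PySem.Chars.isalpha sym_i || sym_i == '\'') &&
             (PySem.Chars.isalpha sym_i1 || sym_i1 == '(') then acc ++ [i]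
        else if sym_i == ')' && PySem.Chars.isalpha sym_i1 then acc ++ [i]
        else acc) []).reverse.foldl
      (fun t i =>
        PySem.List.slice t none (some (Int.ofNat i + 1)) ++
          '*' :: PySem.List.slice t (some (Int.ofNat i + 1)) none) s)
    = pvStream s := by
  rw [pvPos_eq_filter]
  set P := (List.range (s.length - 1)).filter
    (fun i => pvCondA (s.getD i ' ') (s.getD (i + 1) ' ')) with hP
  have hstep : ∀ (t : List Char) (i : Nat),
      PySem.List.slice t none (some (Int.ofNat i + 1)) ++
        '*' :: PySem.List.slice t (some (Int.ofNat i + 1)) none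
      = t.take (i + 1) ++ '*' :: t.drop (i + 1) := by
    intro t i
    have h1 : (Int.ofNat i + 1) = ((i + 1 : Nat) : Int) := by
      simp [Int.ofNat_eq_natCast]
    rw [h1, PySem.List.slice_to_natCast, PySem.List.slice_from_natCast]
  have hfold : P.reverse.foldl
      (fun t i =>
        PySem.List.slice t none (some (Int.ofNat i + 1)) ++
          '*' :: PySem.List.slice t (some (Int.ofNat i + 1)) none) s
      = P.foldr (fun i t => t.take (i + 1) ++ '*' :: t.drop (i + 1)) s := by
    rw [List.foldl_reverse]
    congr 1
    funext i t
    exact hstep t i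
  rw [hfold]
  rw [pvFoldr_splice P s
    (List.Pairwise.filter _ (List.pairwise_lt_range))
    (fun i hi => by
      have := List.mem_range.mp (List.mem_filter.mp hi).1
      omega)]
  exact pvStream_eq_ins s s 0 (by simp)

-- ===== VERDICT (by name: the statement is the Claim_ definition above) =====
theorem normalize_bool_fct_str_spec : Claim_equal_normalize_bool_fct_str := by
  intro fct_str _
  show normalize_bool_fct_str fct_str = normalize_bool_fct_str_alt fct_str
  unfold normalize_bool_fct_str normalize_bool_fct_str_alt
  exact congrArg String.ofList (pvMain (pvClean fct_str))
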